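-- pv_equiv track=rewrite | github.com/CSU-Ryan/CS_220_Assignments | Boolean_Operations/PA2.py | increment_TF_table
-- ===== SOURCE A (Python) =====
-- def increment_TF_table(table):
--     if not isinstance(table, list) or len(table) < 1:
--         return []
--
--     if not table[-1]:
--         table[-1] = True
--         return table
--     else:
--         return increment_TF_table(table[:-1]) + [False]
-- ===== SOURCE B (Python) =====
-- def increment_TF_table(table):
--     if not isinstance(table, list) or len(table) < 1:
--         return []
--     out = []
--     carry = True
--     for bit in reversed(table):
--         if carry and bit:
--             out.append(False)
--         elif carry:
--             out.append(True)
--             carry = False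
--         else:
--             out.append(bit)
--     out.reverse()
--     return out
-- ===== Notes on version B (the rewrite author's own statement) =====
-- stated objective: alternative
-- what changed: Replaced A's tail recursion on slices with list concatenation by a single iterative carry-propagation pass over the reversed list (same cost on typical inputs, linear instead of quadratic when many trailing True entries carry).
import Mathlib
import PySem

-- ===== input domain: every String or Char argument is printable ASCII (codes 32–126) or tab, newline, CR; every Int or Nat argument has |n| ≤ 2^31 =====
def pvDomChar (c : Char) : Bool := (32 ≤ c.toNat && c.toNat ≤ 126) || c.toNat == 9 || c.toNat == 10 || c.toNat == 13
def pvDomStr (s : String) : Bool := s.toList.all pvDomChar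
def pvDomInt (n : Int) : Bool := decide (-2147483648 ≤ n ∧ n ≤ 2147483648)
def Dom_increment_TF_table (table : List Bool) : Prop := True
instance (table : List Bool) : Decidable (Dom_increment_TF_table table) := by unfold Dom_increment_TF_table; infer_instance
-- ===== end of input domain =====

-- B replaces A's slice-and-concatenate recursion by a single carry-propagation pass over
-- the reversed list (objective: alternative). Note: A mutates its argument in place when the
-- last entry is False and B does not; the equivalence proved here is about the RETURN value only.

-- ===== PORT A =====
-- A: if last element is False, set it to True (table[:-1] ++ [True]); else recurse on table[:-1] and append False.
def increment_TF_table (table : List Bool) : List Bool :=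
  if table.length < 1 then []
  else if !((PySem.List.pyGet? table (-1)).getD false) then
    -- table[-1] = True; return table
    PySem.List.slice table none (some (-1)) ++ [true]
  else
    increment_TF_table (PySem.List.slice table none (some (-1))) ++ [false]
termination_by table.length
decreasing_by
  simp only [PySem.List.slice_to_neg_one]
  have : table.length ≠ 0 := by omega
  simp [List.length_dropLast]
  omega

-- ===== PORT B =====
-- carry propagation over the reversed list (Source B's loop over reversed(table), accumulator appended then reversed)
def pvCarryGo : List Bool → Bool → List Bool
  | [], _ => []
  | b :: rest, carry =>
    if carry && b then false :: pvCarryGo rest carry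
    else if carry then true :: pvCarryGo rest false
    else b :: pvCarryGo rest carry

def increment_TF_table_alt (table : List Bool) : List Bool :=
  if table.length < 1 then []
  else (pvCarryGo table.reverse true).reverse

-- ===== PRECONDITION & SPEC =====
def Spec_increment_TF_table (table : List Bool) (out : List Bool) : Prop := out = increment_TF_table_alt table
instance (table : List Bool) (out : List Bool) : Decidable (Spec_increment_TF_table table out) := by unfold Spec_increment_TF_table; infer_instance

-- ===== CLAIM (what is proved, stated in full; the proofs are below) =====
def Claim_equal_increment_TF_table : Prop := ∀ (table : List Bool), Dom_increment_TF_table table → Spec_increment_TF_table table (increment_TF_table table)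

-- ===== LEMMAS AND PROOFS =====

-- with no carry, the pass copies the list
theorem pvCarryGo_false (l : List Bool) : pvCarryGo l false = l := by
  induction l with
  | nil => rfl
  | cons b rest ih => simp [pvCarryGo, ih]

-- A on l.reverse equals the carry pass on l (reversed back)
theorem pvA_reverse (l : List Bool) :
    increment_TF_table l.reverse = (pvCarryGo l true).reverse := by
  induction l with
  | nil => simp [increment_TF_table, pvCarryGo]
  | cons b rest ih =>
    rw [increment_TF_table]
    have hlen : (rest.reverse ++ [b]).length ≥ 1 := by simp
    have hlast : PySem.List.pyGet? (rest.reverse ++ [b]) (-1) = some b := by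
      simp [PySem.List.pyGet?, PySem.List.pyIdx?]
    have hslice : PySem.List.slice (rest.reverse ++ [b]) none (some (-1)) = rest.reverse := by
      rw [PySem.List.slice_to_neg_one]; simp
    cases b with
    | false =>
      simp only [List.reverse_cons, hlast, hslice, pvCarryGo]
      simp [pvCarryGo_false]
    | true =>
      simp only [List.reverse_cons, hlast, hslice, pvCarryGo]
      simp [ih]

-- ===== VERDICT (by name: the statement is the Claim_ definition above) =====
theorem increment_TF_table_spec : Claim_equal_increment_TF_table := by
  intro table _
  unfold Spec_increment_TF_table increment_TF_table_alt
  have h := pvA_reverse table.reverse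
  rw [List.reverse_reverse] at h
  cases htab : table with
  | nil => simp [increment_TF_table]
  | cons x xs => simpa [htab] using h
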